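-- pv_equiv track=rewrite | github.com/Vostbur/codewars_solutions | Python/6 kyu/Esolang Interpreters #1 - Introduction to Esolangs and My First Interpreter (MiniStringFuck)/Kata.py | my_first_interpreter
-- ===== SOURCE A (Python) =====
-- def my_first_interpreter(code):
--     mem, output = 0, ""
--
--     for c in code:
--         match c:
--             case "+":
--                 mem += 1
--             case ".":
--                 output += chr(mem % 256)
--
--     return output
-- ===== SOURCE B (Python) =====
-- def my_first_interpreter(code):
--     total = 0
--     out = []
--     for seg in code.split('.')[:-1]:
--         total += seg.count('+')
--         out.append(chr(total % 256))
--     return ''.join(out)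
-- ===== Notes on version B (the rewrite author's own statement) =====
-- stated objective: faster
-- what changed: B splits the code on the dot separator and counts plus signs per segment with str.count, emitting one character per segment, instead of A's per-character match-statement loop.
import Mathlib
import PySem

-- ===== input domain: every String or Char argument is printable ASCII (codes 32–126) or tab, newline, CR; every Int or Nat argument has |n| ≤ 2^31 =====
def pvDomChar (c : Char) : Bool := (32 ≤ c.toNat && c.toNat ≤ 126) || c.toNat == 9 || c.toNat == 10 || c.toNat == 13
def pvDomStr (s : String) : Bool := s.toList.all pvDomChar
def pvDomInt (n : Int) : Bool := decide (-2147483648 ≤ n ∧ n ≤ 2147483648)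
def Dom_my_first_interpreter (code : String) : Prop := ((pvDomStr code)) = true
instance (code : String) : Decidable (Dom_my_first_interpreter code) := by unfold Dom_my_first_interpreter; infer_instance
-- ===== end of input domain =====

-- B replaces A's per-character state machine by a split-on-dot traversal counting plus signs per segment with a library call (measured faster at a constant factor).

-- ===== PORT A =====
-- loop body of A's 'for c in code' (mem, output accumulator)
def pvStepA (st : Int × List Char) (c : Char) : Int × List Char :=
  if c = '+' then (st.1 + 1, st.2)
  else if c = '.' then (st.1, st.2 ++ [Char.ofNat (PySem.Int.mod st.1 256).toNat])
  else st

def my_first_interpreter (code : String) : String :=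
  String.ofList (code.toList.foldl pvStepA (0, [])).2

-- ===== PORT B =====
-- loop body of B's 'for seg in code.split('.')[:-1]' (total, out accumulator)
def pvStepB (st : Int × List Char) (seg : List Char) : Int × List Char :=
  let t := st.1 + (PySem.Chars.count seg ['+'] : Int)
  (t, st.2 ++ [Char.ofNat (PySem.Int.mod t 256).toNat])

def my_first_interpreter_alt (code : String) : String :=
  String.ofList ((PySem.List.slice (PySem.Chars.splitOn code.toList ['.']) none
    (some (-1))).foldl pvStepB (0, [])).2

-- ===== PRECONDITION & SPEC =====
def Spec_my_first_interpreter (code : String) (out : String) : Prop := out = my_first_interpreter_alt code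
instance (code : String) (out : String) : Decidable (Spec_my_first_interpreter code out) := by unfold Spec_my_first_interpreter; infer_instance

-- ===== CLAIM (what is proved, stated in full; the proofs are below) =====
def Claim_equal_my_first_interpreter : Prop := ∀ (code : String), Dom_my_first_interpreter code → Spec_my_first_interpreter code (my_first_interpreter code)

-- ===== LEMMAS AND PROOFS =====

-- reference recursion for code.split('.') on char lists
def pvSp : List Char → List (List Char)
  | [] => [[]]
  | c :: cs =>
    if c = '.' then [] :: pvSp cs
    else match pvSp cs with
      | [] => [[c]]
      | h :: t => (c :: h) :: t

lemma pvSp_ne_nil (cs : List Char) : pvSp cs ≠ [] := by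
  cases cs with
  | nil => simp [pvSp]
  | cons c cs =>
    simp only [pvSp]
    split_ifs
    · simp
    · cases h : pvSp cs <;> simp

lemma pvCountGo_single (c : Char) : ∀ (fuel : Nat) (l : List Char) (acc : Nat),
    l.length ≤ fuel → PySem.Chars.count.go [c] fuel l acc = acc + l.count c := by
  intro fuel
  induction fuel with
  | zero =>
    intro l acc h
    have hl : l = [] := List.eq_nil_of_length_eq_zero (Nat.le_zero.mp h)
    subst hl
    simp [PySem.Chars.count.go]
  | succ n ih =>
    intro l acc h
    cases l with
    | nil => simp [PySem.Chars.count.go]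
    | cons x xs =>
      simp only [PySem.Chars.count.go]
      by_cases hx : x = c
      · subst hx
        simp only [List.isPrefixOf, BEq.rfl, Bool.true_and, if_true]
        rw [ih]
        · simp; omega
        · simp at h ⊢; omega
      · have : ([c].isPrefixOf (x :: xs)) = false := by
          simp [List.isPrefixOf]
          exact fun hh => hx hh.symm
        rw [this]
        simp only [if_false, Bool.false_eq_true]
        rw [ih]
        · simp [hx]
        · simp at h; omega

lemma pvCount_single (l : List Char) (c : Char) :
    PySem.Chars.count l [c] = l.count c := by
  simp [PySem.Chars.count, pvCountGo_single c l.length l 0 le_rfl]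

lemma pvSplitGo (fuel : Nat) : ∀ (l : List Char), l.length < fuel → ∀ (cur : List Char) (acc : List (List Char)),
    PySem.Chars.splitOn.go ['.'] fuel l cur acc =
      acc.reverse ++ (cur.reverse ++ (pvSp l).headI) :: (pvSp l).tail := by
  induction fuel with
  | zero => intro l h; omega
  | succ n ih =>
    intro l h cur acc
    cases l with
    | nil => simp [PySem.Chars.splitOn.go, pvSp]
    | cons x xs =>
      by_cases hx : x = '.'
      · subst hx
        have hpre : (['.'].isPrefixOf ('.' :: xs)) = true := by simp [List.isPrefixOf]
        simp only [PySem.Chars.splitOn.go, hpre, if_true, List.length_singleton, List.drop_one,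
          List.tail_cons]
        rw [ih xs (by simp at h; omega) [] (cur.reverse :: acc)]
        obtain ⟨hh, t, hsp⟩ : ∃ hh t, pvSp xs = hh :: t := by
          cases hq : pvSp xs with
          | nil => exact absurd hq (pvSp_ne_nil xs)
          | cons a b => exact ⟨a, b, rfl⟩
        simp [pvSp, hsp]
      · have hpre : (['.'].isPrefixOf (x :: xs)) = false := by
          simp [List.isPrefixOf]
          exact fun hh => hx hh.symm
        simp only [PySem.Chars.splitOn.go, hpre, Bool.false_eq_true, if_false]
        rw [ih xs (by simp at h; omega) (x :: cur) acc]
        obtain ⟨hh, t, hsp⟩ : ∃ hh t, pvSp xs = hh :: t := by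
          cases hq : pvSp xs with
          | nil => exact absurd hq (pvSp_ne_nil xs)
          | cons a b => exact ⟨a, b, rfl⟩
        simp [pvSp, hx, hsp]

lemma pvSplitOn_eq (cs : List Char) : PySem.Chars.splitOn cs ['.'] = pvSp cs := by
  unfold PySem.Chars.splitOn
  rw [pvSplitGo (cs.length + 1) cs (by omega) [] []]
  obtain ⟨hh, t, hsp⟩ : ∃ hh t, pvSp cs = hh :: t := by
    cases hq : pvSp cs with
    | nil => exact absurd hq (pvSp_ne_nil cs)
    | cons a b => exact ⟨a, b, rfl⟩
  simp [hsp]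

lemma pvStepB_acc (segs : List (List Char)) : ∀ (t : Int) (out : List Char),
    (segs.foldl pvStepB (t, out)).2 = out ++ (segs.foldl pvStepB (t, [])).2 := by
  induction segs with
  | nil => simp
  | cons s ss ih =>
    intro t out
    simp only [List.foldl_cons, pvStepB]
    conv_lhs => rw [ih]
    conv_rhs => rw [ih]
    simp

lemma pvMain (cs : List Char) : ∀ (m : Int) (out : List Char),
    (cs.foldl pvStepA (m, out)).2 = out ++ ((pvSp cs).dropLast.foldl pvStepB (m, [])).2 := by
  induction cs with
  | nil => simp [pvSp]
  | cons c cs ih =>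
    intro m out
    obtain ⟨hh, t, hsp⟩ : ∃ hh t, pvSp cs = hh :: t := by
      cases hq : pvSp cs with
      | nil => exact absurd hq (pvSp_ne_nil cs)
      | cons a b => exact ⟨a, b, rfl⟩
    by_cases hc : c = '.'
    · subst hc
      have hstep : pvStepA (m, out) '.' = (m, out ++ [Char.ofNat (PySem.Int.mod m 256).toNat]) := by
        simp [pvStepA]
      rw [List.foldl_cons, hstep, ih]
      have h0 : pvStepB (m, []) ([] : List Char) = (m, [Char.ofNat (PySem.Int.mod m 256).toNat]) := by
        simp [pvStepB, pvCount_single]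
      have hsp2 : pvSp ('.' :: cs) = [] :: hh :: t := by simp [pvSp, hsp]
      rw [hsp2, List.dropLast_cons₂, List.foldl_cons, h0, hsp]
      conv_rhs => rw [pvStepB_acc]
      simp
    · have hcount : (PySem.Chars.count (c :: hh) ['+'] : Int)
          = (if c = '+' then 1 else 0) + (PySem.Chars.count hh ['+'] : Int) := by
        rw [pvCount_single, pvCount_single]
        simp [List.count_cons]
        split_ifs with h1 <;> ring
      have hstep : ∀ out', ((c :: cs).foldl pvStepA (m, out')).2
          = (cs.foldl pvStepA (m + (if c = '+' then 1 else 0), out')).2 := by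
        intro out'
        by_cases h1 : c = '+' <;> simp [pvStepA, h1, hc]
      have hsp' : pvSp (c :: cs) = (c :: hh) :: t := by
        simp [pvSp, hc, hsp]
      rw [hstep, ih]
      cases t with
      | nil => simp [hsp', hsp]
      | cons t0 ts =>
        simp only [hsp', hsp, List.dropLast_cons₂, List.foldl_cons, pvStepB, hcount,
          List.nil_append, add_assoc]

-- ===== VERDICT (by name: the statement is the Claim_ definition above) =====
theorem my_first_interpreter_spec : Claim_equal_my_first_interpreter := by
  intro code _
  unfold Spec_my_first_interpreter my_first_interpreter my_first_interpreter_alt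
  rw [PySem.List.slice_to_neg_one, pvSplitOn_eq, pvMain]
  simp
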